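-- pv_equiv track=rewrite | github.com/jovyinny/NECTA-API | nectaapi/students.py | splitAfter
-- ===== SOURCE A (Python) =====
-- from typing import Dict, Any, List, Optional
--
-- def splitAfter(text) -> Dict[str, str]:
--     subjects = {}  # a dictionary of subject grade pair
--     values = []
--     temp = ""
--     for i in range(0, len(text) - 1):
--         temp += text[i]
--         if text[i] == "'" and text[i + 1] == " ":
--             values.append(temp)
--             temp = ""
--
--     for v in values:
--         q = v.split("-")
--         subject = q[0].strip()
--         grade = q[1].strip().strip("'")
--         subjects.update({subject: grade})
--
--     return subjects
-- ===== SOURCE B (Python) =====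
-- def splitAfter(text) -> dict:
--     # Tokenize on the "' " delimiter instead of scanning character by character.
--     # split() consumes the closing quote, so restore it before parsing each piece;
--     # the last split piece is the text after the final delimiter, which is discarded.
--     subjects = {}
--     for piece in text.split("' ")[:-1]:
--         q = (piece + "'").split("-")
--         subjects[q[0].strip()] = q[1].strip().strip("'")
--     return subjects
-- ===== Notes on version B (the rewrite author's own statement) =====
-- stated objective: faster
-- what changed: Replaces A's manual character-accumulator scan (index loop with one-character lookahead building each token by repeated string concatenation) by tokenizing with text.split("' "), dropping the last piece and restoring the quote the delimiter consumed before parsing each piece.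
import Mathlib
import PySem

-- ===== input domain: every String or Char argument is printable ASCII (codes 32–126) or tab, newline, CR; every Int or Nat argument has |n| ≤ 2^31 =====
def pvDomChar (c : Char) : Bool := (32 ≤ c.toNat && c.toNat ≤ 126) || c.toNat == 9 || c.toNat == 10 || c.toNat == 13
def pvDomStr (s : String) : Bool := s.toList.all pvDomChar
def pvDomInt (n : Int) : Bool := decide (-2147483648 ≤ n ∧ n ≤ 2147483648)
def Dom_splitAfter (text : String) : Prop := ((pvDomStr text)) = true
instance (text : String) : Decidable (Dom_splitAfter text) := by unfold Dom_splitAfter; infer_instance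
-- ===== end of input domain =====

-- B tokenizes with text.split("' ") (dropping the piece after the final delimiter and restoring the
-- quote the delimiter consumed) instead of A's manual character-accumulator scan; same dict wherever A returns.


-- ===== PORT A =====
-- A's first loop: for i in range(0, len(text)-1): temp += text[i]; if text[i]=="'" and text[i+1]==" ": values.append(temp); temp=""
-- ported as the structural recursion with a one-character lookahead (i runs exactly over the positions
-- that have a successor); the state (temp, values) and the order of operations are A's.
def splitAfterLoop : List Char → List Char → List (List Char) → List (List Char) × List Char
  | c :: d :: rest, temp, values =>
    if c = '\'' ∧ d = ' ' then splitAfterLoop (d :: rest) [] (values ++ [temp ++ [c]])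
    else splitAfterLoop (d :: rest) (temp ++ [c]) values
  | _, temp, values => (values, temp)

-- A's second-loop body: q = v.split("-"); subjects[q[0].strip()] = q[1].strip().strip("'").
-- q.getD 1 [] guards the IndexError Python raises when v has no '-' (the inputs Pre_splitAfter excludes).
def splitAfterBody (d : PySem.Dict String String) (v : List Char) : PySem.Dict String String :=
  let q := PySem.Chars.splitOn v ['-']
  let subject := PySem.Chars.strip (q.getD 0 [])
  let grade := PySem.Chars.stripChars (PySem.Chars.strip (q.getD 1 [])) ['\'']
  d.insert (String.ofList subject) (String.ofList grade)

def splitAfter (text : String) : List (String × String) :=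
  let values := (splitAfterLoop text.toList [] []).1
  (values.foldl splitAfterBody PySem.Dict.empty).items

-- ===== PORT B =====
-- B's loop body: q = (piece + "'").split("-"); subjects[q[0].strip()] = q[1].strip().strip("'")
def splitAfterAltBody (d : PySem.Dict String String) (p : List Char) : PySem.Dict String String :=
  let q := PySem.Chars.splitOn (p ++ ['\'']) ['-']
  let subject := PySem.Chars.strip (q.getD 0 [])
  let grade := PySem.Chars.stripChars (PySem.Chars.strip (q.getD 1 [])) ['\'']
  d.insert (String.ofList subject) (String.ofList grade)

-- text.split("' ")[:-1] is the dropLast of the split pieces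
def splitAfter_alt (text : String) : List (String × String) :=
  (((PySem.Chars.splitOn text.toList ['\'', ' ']).dropLast).foldl splitAfterAltBody PySem.Dict.empty).items

-- ===== PRECONDITION & SPEC =====
-- Pre_ excludes exactly the inputs on which the Python A raises IndexError (q[1] when a token before
-- some "' " delimiter contains no '-'); the Python B raises IndexError there too.
def Pre_splitAfter (text : String) : Prop :=
  ∀ p ∈ (PySem.Chars.splitOn text.toList ['\'', ' ']).dropLast, '-' ∈ p
instance (text : String) : Decidable (Pre_splitAfter text) := by unfold Pre_splitAfter; infer_instance

def pvWitness_splitAfter : String := "physics - 'A' chemistry - 'B' "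

def Spec_splitAfter (text : String) (out : List (String × String)) : Prop := out = splitAfter_alt text
instance (text : String) (out : List (String × String)) : Decidable (Spec_splitAfter text out) := by unfold Spec_splitAfter; infer_instance

-- ===== CLAIM (what is proved, stated in full; the proofs are below) =====
def Claim_equal_splitAfter : Prop := ∀ (text : String), Dom_splitAfter text → Pre_splitAfter text → Spec_splitAfter text (splitAfter text)

-- ===== LEMMAS AND PROOFS =====

-- a structural re-statement of PySem.Chars.splitOn (proved equal below), convenient for induction
def prependHead (x : List Char) : List (List Char) → List (List Char)
  | [] => [x]
  | p :: ps => (x ++ p) :: ps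

def splitRec (c0 : Char) (sep' : List Char) : List Char → List (List Char)
  | [] => [[]]
  | c :: rest =>
    if (c0 :: sep').isPrefixOf (c :: rest) then [] :: splitRec c0 sep' ((c :: rest).drop (sep'.length + 1))
    else prependHead [c] (splitRec c0 sep' rest)
termination_by l => l.length
decreasing_by all_goals (simp [List.length_drop]; try omega)

lemma splitRec_cons (c0 : Char) (sep' : List Char) (c : Char) (rest : List Char) :
    splitRec c0 sep' (c :: rest)
      = if (c0 :: sep').isPrefixOf (c :: rest) then [] :: splitRec c0 sep' (rest.drop sep'.length)
        else prependHead [c] (splitRec c0 sep' rest) := by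
  rw [splitRec]
  simp

lemma prependHead_ne_nil (x : List Char) (ps : List (List Char)) : prependHead x ps ≠ [] := by
  cases ps <;> simp [prependHead]

lemma splitRec_ne_nil (c0 : Char) (sep' : List Char) (l : List Char) : splitRec c0 sep' l ≠ [] := by
  cases l with
  | nil => simp [splitRec]
  | cons c rest => rw [splitRec_cons]; split; · simp
                   · exact prependHead_ne_nil _ _

lemma prependHead_nil_eq (ps : List (List Char)) (h : ps ≠ []) : prependHead [] ps = ps := by
  cases ps with
  | nil => exact absurd rfl h
  | cons p ps => simp [prependHead]

lemma go_eq_splitRec (c0 : Char) (sep' : List Char) :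
    ∀ (fuel : Nat) (l cur : List Char) (acc : List (List Char)), l.length < fuel →
      PySem.Chars.splitOn.go (c0 :: sep') fuel l cur acc
        = acc.reverse ++ prependHead cur.reverse (splitRec c0 sep' l) := by
  intro fuel
  induction fuel with
  | zero => intro l cur acc h; omega
  | succ fuel ih =>
    intro l cur acc h
    cases l with
    | nil =>
      simp [PySem.Chars.splitOn.go, splitRec, prependHead]
    | cons c rest =>
      rw [PySem.Chars.splitOn.go]
      by_cases hp : (c0 :: sep').isPrefixOf (c :: rest) = true
      · rw [if_pos hp]
        rw [ih _ _ _ (by simp at h ⊢; omega)]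
        rw [splitRec_cons, if_pos hp]
        simp only [List.reverse_nil, List.length_cons, List.drop_succ_cons,
          prependHead_nil_eq _ (splitRec_ne_nil _ _ _)]
        simp [prependHead]
      · rw [if_neg hp]
        rw [ih _ _ _ (by simp at h ⊢; omega)]
        rw [splitRec_cons, if_neg hp]
        rcases splitRec c0 sep' rest with _ | ⟨p, ps⟩ <;> simp [prependHead]

lemma splitOn_eq_splitRec (c0 : Char) (sep' l : List Char) :
    PySem.Chars.splitOn l (c0 :: sep') = splitRec c0 sep' l := by
  rw [PySem.Chars.splitOn, go_eq_splitRec c0 sep' _ _ _ _ (by omega)]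
  simp [prependHead_nil_eq _ (splitRec_ne_nil c0 sep' l)]

lemma splitRec_quote_space (rest : List Char) :
    splitRec '\'' [' '] ('\'' :: ' ' :: rest) = [] :: splitRec '\'' [' '] rest := by
  rw [splitRec_cons, if_pos (by simp)]
  simp

lemma splitRec_cons_ne (c0 : Char) (sep' : List Char) (c : Char) (rest : List Char)
    (h : c ≠ c0) :
    splitRec c0 sep' (c :: rest) = prependHead [c] (splitRec c0 sep' rest) := by
  rw [splitRec_cons, if_neg ?_]
  simp only [List.isPrefixOf_iff_prefix, List.cons_prefix_cons]
  rintro ⟨h1, -⟩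
  exact h h1.symm

lemma splitRec_two_ne (c d : Char) (rest : List Char) (h : ¬(c = '\'' ∧ d = ' ')) :
    splitRec '\'' [' '] (c :: d :: rest) = prependHead [c] (splitRec '\'' [' '] (d :: rest)) := by
  rw [splitRec_cons, if_neg ?_]
  simp only [List.isPrefixOf_iff_prefix, List.cons_prefix_cons, List.nil_prefix, and_true]
  rintro ⟨h1, h2⟩
  exact h ⟨h1.symm, h2.symm⟩

-- A's accumulated values, expressed through the split pieces: the first value is the first piece
-- plus the consumed quote; every later value additionally starts with the consumed space.
def markValues (temp : List Char) : List (List Char) → List (List Char)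
  | [] => []
  | p :: ps => (temp ++ p ++ ['\'']) :: ps.map (fun q => ' ' :: (q ++ ['\'']))

lemma loop_eq_markValues (l temp : List Char) (values : List (List Char)) :
    (splitAfterLoop l temp values).1
      = values ++ markValues temp (splitRec '\'' [' '] l).dropLast := by
  induction l, temp, values using splitAfterLoop.induct with
  | case1 c d rest temp values hcd ih =>
    obtain ⟨hc, hd⟩ := hcd
    subst hc hd
    rw [splitAfterLoop, if_pos ⟨rfl, rfl⟩, ih, splitRec_quote_space,
      splitRec_cons_ne _ _ _ _ (by decide)]
    rcases h : splitRec '\'' [' '] rest with _ | ⟨p, ps⟩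
    · exact absurd h (splitRec_ne_nil _ _ _)
    · rcases ps with _ | ⟨p2, ps⟩ <;> simp [markValues, prependHead]
  | case2 c d rest temp values hcd ih =>
    rw [splitAfterLoop, if_neg hcd, ih, splitRec_two_ne _ _ _ hcd]
    rcases h : splitRec '\'' [' '] (d :: rest) with _ | ⟨p, ps⟩
    · exact absurd h (splitRec_ne_nil _ _ _)
    · rcases ps with _ | ⟨p2, ps⟩ <;> simp [markValues, prependHead]
  | case3 l temp values h =>
    rcases l with _ | ⟨c, _ | ⟨d, rest⟩⟩
    · simp [splitAfterLoop, splitRec, markValues]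
    · rw [splitRec_cons, if_neg (by
        simp only [List.isPrefixOf_iff_prefix, List.cons_prefix_cons]
        rintro ⟨-, h2⟩
        simp at h2)]
      simp [splitAfterLoop, splitRec, prependHead, markValues]
    · exact absurd (h c d rest rfl) (by simp)

lemma strip_cons_space (xs : List Char) : PySem.Chars.strip (' ' :: xs) = PySem.Chars.strip xs := by
  simp [PySem.Chars.strip, PySem.Chars.lstrip, PySem.Chars.isspace]

lemma body_space (d : PySem.Dict String String) (p : List Char) :
    splitAfterBody d (' ' :: (p ++ ['\''])) = splitAfterAltBody d p := by
  unfold splitAfterBody splitAfterAltBody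
  rw [splitOn_eq_splitRec, splitOn_eq_splitRec, splitRec_cons_ne _ _ _ _ (by decide)]
  rcases h : splitRec '-' [] (p ++ ['\'']) with _ | ⟨r0, rs⟩
  · exact absurd h (splitRec_ne_nil _ _ _)
  · simp [prependHead, strip_cons_space]

lemma fold_tail (ps : List (List Char)) (d : PySem.Dict String String) :
    List.foldl splitAfterBody d (ps.map (fun q => ' ' :: (q ++ ['\''])))
      = List.foldl splitAfterAltBody d ps := by
  rw [List.foldl_map]
  exact PySem.List.foldl_congr_mem _ _ _ _ (fun acc x _ => body_space acc x)

lemma body_head (d : PySem.Dict String String) (p : List Char) :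
    splitAfterBody d (p ++ ['\'']) = splitAfterAltBody d p := rfl

lemma fold_mark (ps : List (List Char)) :
    List.foldl splitAfterBody PySem.Dict.empty (markValues [] ps)
      = List.foldl splitAfterAltBody PySem.Dict.empty ps := by
  cases ps with
  | nil => rfl
  | cons p ps =>
    simp only [markValues, List.nil_append, List.foldl_cons, body_head, fold_tail]

-- ===== VERDICT (by name: the statement is the Claim_ definition above) =====
theorem splitAfter_spec : Claim_equal_splitAfter := by
  intro text _ _
  show splitAfter text = splitAfter_alt text
  unfold splitAfter splitAfter_alt
  rw [loop_eq_markValues, splitOn_eq_splitRec]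
  simp [fold_mark]
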